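-- pv_equiv track=rewrite | github.com/saroup/putput | putput/joiner.py | _one_d_to_mult_d
-- ===== SOURCE A (Python) =====
-- from functools import reduce
-- from typing import Sequence
--
-- def _one_d_to_mult_d(one_d: int, component_lengths: Sequence[int]) -> Sequence[int]:
--     # https://stackoverflow.com/questions/12429492/how-to-convert-a-monodimensional-index-to-corresponding-indices-in-a-multidimens
--     indices = []
--     for i, component_length in enumerate(component_lengths):
--         if component_lengths[i+1:]:
--             index = (one_d // _mul(component_lengths[i+1:])) % component_length
--         else:
--             index = one_d % component_length
--         indices.append(index)
--     return indices
--
-- def _mul(component_lengths: Sequence[int]) -> int: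
--     return reduce(lambda x, y: x * y, component_lengths)
-- ===== SOURCE B (Python) =====
-- def _one_d_to_mult_d(one_d, component_lengths):
--     # single reverse pass with a running suffix product (O(n) vs A's O(n^2))
--     indices = []
--     suffix = 1
--     for length in reversed(component_lengths):
--         indices.append((one_d // suffix) % length)
--         suffix *= length
--     indices.reverse()
--     return indices
-- ===== Notes on version B (the rewrite author's own statement) =====
-- stated objective: faster
-- what changed: Replaces the per-index recomputation of the tail product (reduce over a fresh slice at every position) by a single reverse pass that maintains a running suffix product, building the result back-to-front.
import Mathlib
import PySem

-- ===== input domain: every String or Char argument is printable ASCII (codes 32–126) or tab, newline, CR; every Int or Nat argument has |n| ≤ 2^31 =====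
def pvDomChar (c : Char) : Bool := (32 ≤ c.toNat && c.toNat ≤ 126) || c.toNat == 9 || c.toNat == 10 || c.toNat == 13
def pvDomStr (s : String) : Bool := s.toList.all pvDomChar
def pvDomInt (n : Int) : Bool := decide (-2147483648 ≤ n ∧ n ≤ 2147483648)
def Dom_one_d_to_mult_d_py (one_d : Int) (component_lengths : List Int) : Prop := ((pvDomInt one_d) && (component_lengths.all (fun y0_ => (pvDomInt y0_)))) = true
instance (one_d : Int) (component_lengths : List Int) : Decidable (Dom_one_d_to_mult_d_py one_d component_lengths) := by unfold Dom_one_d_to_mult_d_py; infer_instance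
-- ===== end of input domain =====

-- ===== PORT A =====
-- B replaces A's per-index tail-product recomputation by one reverse pass with a
-- running suffix product (asymptotically faster); return values proved equal on Pre_.

-- reduce(lambda x, y: x * y, xs); Python raises on [], A only calls it on nonempty slices
def pvMulA : List Int → Int
  | [] => 0
  | h :: t => t.foldl (· * ·) h

-- for i, c in enumerate(cls): the slice cls[i+1:] is exactly the rest of the list,
-- so the loop is the structural recursion on the list
def one_d_to_mult_d_py (one_d : Int) (component_lengths : List Int) : List Int :=
  match component_lengths with
  | [] => []
  | c :: rest =>
    (if rest ≠ [] then PySem.Int.mod (PySem.Int.floordiv one_d (pvMulA rest)) c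
     else PySem.Int.mod one_d c)
    :: one_d_to_mult_d_py one_d rest

-- ===== PORT B =====
-- fold over reversed(cls) carrying (suffix, indices); indices reversed at the end, as in Source B
def one_d_to_mult_d_py_alt (one_d : Int) (component_lengths : List Int) : List Int :=
  (component_lengths.reverse.foldl
    (fun (st : Int × List Int) length =>
      (st.1 * length, st.2 ++ [PySem.Int.mod (PySem.Int.floordiv one_d st.1) length]))
    (1, ([] : List Int))).2.reverse

-- ===== PRECONDITION & SPEC =====
-- Python A raises ZeroDivisionError exactly when some component length is 0
def Pre_one_d_to_mult_d_py (one_d : Int) (component_lengths : List Int) : Prop :=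
  ∀ x ∈ component_lengths, x ≠ 0
instance (one_d : Int) (component_lengths : List Int) : Decidable (Pre_one_d_to_mult_d_py one_d component_lengths) := by unfold Pre_one_d_to_mult_d_py; infer_instance
def pvWitness_one_d_to_mult_d_py : Int × List Int := (7, [2, 3, 4])

def Spec_one_d_to_mult_d_py (one_d : Int) (component_lengths : List Int) (out : List Int) : Prop := out = one_d_to_mult_d_py_alt one_d component_lengths
instance (one_d : Int) (component_lengths : List Int) (out : List Int) : Decidable (Spec_one_d_to_mult_d_py one_d component_lengths out) := by unfold Spec_one_d_to_mult_d_py; infer_instance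

-- ===== CLAIM (what is proved, stated in full; the proofs are below) =====
def Claim_equal_one_d_to_mult_d_py : Prop := ∀ (one_d : Int) (component_lengths : List Int), Dom_one_d_to_mult_d_py one_d component_lengths → Pre_one_d_to_mult_d_py one_d component_lengths → Spec_one_d_to_mult_d_py one_d component_lengths (one_d_to_mult_d_py one_d component_lengths)

-- ===== LEMMAS AND PROOFS =====

-- ===== LEMMAS AND PROOFS =====

-- indices produced by B's loop, as a function of the starting suffix product
def pvIdx (one_d : Int) : Int → List Int → List Int
  | _, [] => []
  | s, L :: t => PySem.Int.mod (PySem.Int.floordiv one_d s) L :: pvIdx one_d (s * L) t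

theorem pvFoldB (one_d : Int) : ∀ (ys : List Int) (s : Int) (acc : List Int),
    ys.foldl (fun (st : Int × List Int) length =>
      (st.1 * length, st.2 ++ [PySem.Int.mod (PySem.Int.floordiv one_d st.1) length])) (s, acc)
    = (ys.foldl (· * ·) s, acc ++ pvIdx one_d s ys) := by
  intro ys
  induction ys with
  | nil => simp [pvIdx]
  | cons L t ih => intro s acc; simp [pvIdx, ih]

theorem pvIdxAppend (one_d : Int) : ∀ (xs : List Int) (s c : Int),
    pvIdx one_d s (xs ++ [c])
    = pvIdx one_d s xs ++ [PySem.Int.mod (PySem.Int.floordiv one_d (xs.foldl (· * ·) s)) c] := by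
  intro xs
  induction xs with
  | nil => simp [pvIdx]
  | cons L t ih => intro s c; simp [pvIdx, ih]

theorem pvAltCons (one_d c : Int) (rest : List Int) :
    one_d_to_mult_d_py_alt one_d (c :: rest)
    = PySem.Int.mod (PySem.Int.floordiv one_d (rest.foldl (· * ·) 1)) c
      :: one_d_to_mult_d_py_alt one_d rest := by
  have hp : rest.reverse.foldl (· * ·) (1 : Int) = rest.foldl (· * ·) 1 := by
    rw [← List.prod_eq_foldl, ← List.prod_eq_foldl, List.prod_reverse]
  unfold one_d_to_mult_d_py_alt
  rw [List.reverse_cons, pvFoldB one_d (rest.reverse ++ [c]), pvFoldB one_d rest.reverse,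
    pvIdxAppend, hp]
  simp

theorem pvMulAEq (h : Int) (t : List Int) :
    pvMulA (h :: t) = (h :: t).foldl (· * ·) 1 := by
  simp [pvMulA]

-- ===== VERDICT (by name: the statement is the Claim_ definition above) =====
theorem one_d_to_mult_d_py_spec : Claim_equal_one_d_to_mult_d_py := by
  intro one_d cls hd hp
  clear hd hp
  unfold Spec_one_d_to_mult_d_py
  induction cls with
  | nil => simp [one_d_to_mult_d_py, one_d_to_mult_d_py_alt]
  | cons c rest ih =>
    rw [pvAltCons, one_d_to_mult_d_py]
    cases rest with
    | nil => simp [one_d_to_mult_d_py, one_d_to_mult_d_py_alt, PySem.Int.floordiv]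
    | cons h t =>
      rw [← ih]
      congr 1
      simp [pvMulAEq]
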